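-- pv_equiv track=rewrite | github.com/MatthewDaws/PDFImage | pdfimage/image.py | _find_false_segments
-- ===== SOURCE A (Python) =====
-- def _find_false_segments(segs):
--     out = []
--     start = 0
--     while True:
--         while start < len(segs) and segs[start]:
--             start += 1
--         if start >= len(segs):
--             break
--         end = start + 1
--         while end < len(segs) and not segs[end]:
--             end += 1
--         out.append((start, end-1))
--         start = end + 1
--         if start >= len(segs):
--             break
--     return out
-- ===== SOURCE B (Python) =====
-- def _find_false_segments(segs):
--     out = []
--     run_start = None
--     for i, v in enumerate(segs):
--         if v:
--             if run_start is not None: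
--                 out.append((run_start, i - 1))
--                 run_start = None
--         else:
--             if run_start is None:
--                 run_start = i
--     if run_start is not None:
--         out.append((run_start, len(segs) - 1))
--     return out
-- ===== Notes on version B (the rewrite author's own statement) =====
-- stated objective: simpler
-- what changed: Replaces the nested index-advancing while loops with a single flat enumerate pass keeping a run_start flag, flushing the open run after the loop.
import Mathlib
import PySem

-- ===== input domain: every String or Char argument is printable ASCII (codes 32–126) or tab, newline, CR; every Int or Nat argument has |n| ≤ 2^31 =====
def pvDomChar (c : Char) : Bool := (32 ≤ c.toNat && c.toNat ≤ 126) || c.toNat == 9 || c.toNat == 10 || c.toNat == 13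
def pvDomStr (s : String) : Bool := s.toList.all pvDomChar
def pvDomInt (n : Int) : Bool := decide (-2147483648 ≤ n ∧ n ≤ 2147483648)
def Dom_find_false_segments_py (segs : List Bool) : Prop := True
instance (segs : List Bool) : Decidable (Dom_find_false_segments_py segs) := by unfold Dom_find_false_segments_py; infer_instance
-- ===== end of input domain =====

-- B replaces A's nested index-advancing while loops by one flat enumerate pass with a run_start flag (objective: simpler).

-- ===== PORT A =====
-- inner `while start < len(segs) and segs[start]: start += 1`
def pvSkipTrue (segs : List Bool) (i : Nat) : Nat :=
  if h : i < segs.length then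
    if segs[i] then pvSkipTrue segs (i + 1) else i
  else i
termination_by segs.length - i

-- inner `while end < len(segs) and not segs[end]: end += 1`
def pvSkipFalse (segs : List Bool) (i : Nat) : Nat :=
  if h : i < segs.length then
    if segs[i] then i else pvSkipFalse segs (i + 1)
  else i
termination_by segs.length - i

theorem pvSkipTrue_ge (segs : List Bool) (i : Nat) : i ≤ pvSkipTrue segs i := by
  unfold pvSkipTrue
  split
  · split
    · have := pvSkipTrue_ge segs (i + 1); omega
    · exact le_refl _
  · exact le_refl _
termination_by segs.length - i

theorem pvSkipFalse_ge (segs : List Bool) (i : Nat) : i ≤ pvSkipFalse segs i := by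
  unfold pvSkipFalse
  split
  · split
    · exact le_refl _
    · have := pvSkipFalse_ge segs (i + 1); omega
  · exact le_refl _
termination_by segs.length - i

-- outer `while True` loop of A
def pvALoop (segs : List Bool) (start : Nat) (out : List (Int × Int)) : List (Int × Int) :=
  if hs : pvSkipTrue segs start ≥ segs.length then out
  else
    pvALoop segs (pvSkipFalse segs (pvSkipTrue segs start + 1) + 1)
      (out ++ [((pvSkipTrue segs start : Int), (pvSkipFalse segs (pvSkipTrue segs start + 1) : Int) - 1)])
termination_by segs.length - start
decreasing_by
  have h1 := pvSkipTrue_ge segs start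
  have h2 := pvSkipFalse_ge segs (pvSkipTrue segs start + 1)
  omega

def find_false_segments_py (segs : List Bool) : List (Int × Int) :=
  pvALoop segs 0 []

-- ===== PORT B =====
-- body of the `for i, v in enumerate(segs)` loop
def pvBStep (st : Option Int × List (Int × Int)) (iv : Int × Bool) : Option Int × List (Int × Int) :=
  if iv.2 then
    match st.1 with
    | some s => (none, st.2 ++ [(s, iv.1 - 1)])
    | none => st
  else
    match st.1 with
    | none => (some iv.1, st.2)
    | some _ => st

def find_false_segments_py_alt (segs : List Bool) : List (Int × Int) :=
  let r := (PySem.List.enumerate segs).foldl pvBStep (none, [])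
  match r.1 with
  | some s => r.2 ++ [(s, (segs.length : Int) - 1)]
  | none => r.2

-- ===== PRECONDITION & SPEC =====
def Spec_find_false_segments_py (segs : List Bool) (out : List (Int × Int)) : Prop := out = find_false_segments_py_alt segs
instance (segs : List Bool) (out : List (Int × Int)) : Decidable (Spec_find_false_segments_py segs out) := by unfold Spec_find_false_segments_py; infer_instance

-- ===== CLAIM (what is proved, stated in full; the proofs are below) =====
def Claim_equal_find_false_segments_py : Prop := ∀ (segs : List Bool), Dom_find_false_segments_py segs → Spec_find_false_segments_py segs (find_false_segments_py segs)

-- ===== LEMMAS AND PROOFS =====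

-- Reference description of the false-run segments of l, with l sitting at offset i of the whole list.
mutual
def pvF : List Bool → Nat → List (Int × Int)
  | [], _ => []
  | true :: r, i => pvF r (i + 1)
  | false :: r, i => pvG r (i + 1) i

-- scanning a run of falses that started at index s
def pvG : List Bool → Nat → Nat → List (Int × Int)
  | [], i, s => [((s : Int), (i : Int) - 1)]
  | true :: r, i, s => ((s : Int), (i : Int) - 1) :: pvF r (i + 1)
  | false :: r, i, s => pvG r (i + 1) s
end

theorem pvDrop_cons (l : List Bool) (i : Nat) (h : i < l.length) :
    l.drop i = l[i] :: l.drop (i + 1) := by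
  exact (List.getElem_cons_drop h).symm

theorem pvSkipTrue_f (segs : List Bool) (i : Nat) :
    pvF (segs.drop i) i = pvF (segs.drop (pvSkipTrue segs i)) (pvSkipTrue segs i) := by
  unfold pvSkipTrue
  split
  · rename_i h
    split
    · rename_i hv
      rw [pvDrop_cons segs i h, hv]
      simpa [pvF] using pvSkipTrue_f segs (i + 1)
    · rfl
  · rfl
termination_by segs.length - i

theorem pvSkipFalse_g (segs : List Bool) (i s : Nat) :
    pvG (segs.drop i) i s = pvG (segs.drop (pvSkipFalse segs i)) (pvSkipFalse segs i) s := by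
  unfold pvSkipFalse
  split
  · rename_i h
    split
    · rfl
    · rename_i hv
      rw [pvDrop_cons segs i h, Bool.of_not_eq_true hv]
      simpa [pvG] using pvSkipFalse_g segs (i + 1) s
  · rfl
termination_by segs.length - i

theorem pvSkipTrue_stop (segs : List Bool) (i : Nat) :
    segs.getD (pvSkipTrue segs i) false = false := by
  rw [pvSkipTrue]
  split
  · split
    · exact pvSkipTrue_stop segs (i + 1)
    · rename_i h hv
      rw [List.getD_eq_getElem _ _ h]
      simpa using hv
  · rename_i h
    simp [le_of_not_gt h]
termination_by segs.length - i

theorem pvSkipFalse_stop (segs : List Bool) (i : Nat) :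
    segs.getD (pvSkipFalse segs i) true = true := by
  rw [pvSkipFalse]
  split
  · split
    · rename_i h hv
      rw [List.getD_eq_getElem _ _ h]
      simpa using hv
    · exact pvSkipFalse_stop segs (i + 1)
  · rename_i h
    simp [le_of_not_gt h]
termination_by segs.length - i

theorem pvALoop_f (segs : List Bool) (start : Nat) (out : List (Int × Int)) :
    pvALoop segs start out = out ++ pvF (segs.drop start) start := by
  rw [pvALoop]
  split
  · rename_i hs
    rw [pvSkipTrue_f segs start, List.drop_eq_nil_of_le (by omega)]
    simp [pvF]
  · rename_i hs
    rw [not_le] at hs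
    set s := pvSkipTrue segs start with hsdef
    set e := pvSkipFalse segs (s + 1) with hedef
    have h1 := pvSkipTrue_ge segs start
    have h2 := pvSkipFalse_ge segs (s + 1)
    have hsv : segs[s] = false := by
      have := pvSkipTrue_stop segs start
      rwa [← hsdef, List.getD_eq_getElem _ _ hs] at this
    have hrec := pvALoop_f segs (e + 1) (out ++ [((s : Int), (e : Int) - 1)])
    rw [hrec]
    have hsf : pvF (segs.drop start) start = pvG (segs.drop (s + 1)) (s + 1) s := by
      rw [pvSkipTrue_f segs start, ← hsdef, pvDrop_cons segs s hs, hsv]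
      simp [pvF]
    rw [hsf, pvSkipFalse_g segs (s + 1) s, ← hedef]
    by_cases he : e < segs.length
    · have hev : segs[e] = true := by
        have := pvSkipFalse_stop segs (s + 1)
        rwa [← hedef, List.getD_eq_getElem _ _ he] at this
      rw [pvDrop_cons segs e he, hev]
      simp [pvG]
    · rw [List.drop_eq_nil_of_le (by omega), List.drop_eq_nil_of_le (by omega)]
      simp [pvF, pvG]
termination_by segs.length - start
decreasing_by
  have h1 := pvSkipTrue_ge segs start
  have h2 := pvSkipFalse_ge segs (pvSkipTrue segs start + 1)
  omega

-- flush step after B's loop, with n = len(segs)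
def pvBFin (r : Option Int × List (Int × Int)) (n : Nat) : List (Int × Int) :=
  match r.1 with
  | some s => r.2 ++ [(s, (n : Int) - 1)]
  | none => r.2

mutual
theorem pvBFold_none (l : List Bool) (i : Nat) (out : List (Int × Int)) :
    pvBFin ((PySem.List.enumerate l (i : Int)).foldl pvBStep (none, out)) (i + l.length) =
      out ++ pvF l i := by
  match l with
  | [] => simp [PySem.List.enumerate_nil, pvBFin, pvF]
  | v :: r =>
    rw [PySem.List.enumerate_cons]
    cases v with
    | true =>
      have ih := pvBFold_none r (i + 1) out
      push_cast at ih
      simp only [List.foldl_cons, pvBStep, List.length_cons, pvF]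
      rw [show i + (r.length + 1) = (i + 1) + r.length from by omega]
      simpa using ih
    | false =>
      have ih := pvBFold_some r (i + 1) i out
      push_cast at ih
      simp only [List.foldl_cons, pvBStep, List.length_cons, pvF]
      rw [show i + (r.length + 1) = (i + 1) + r.length from by omega]
      simpa using ih
termination_by (l.length, 0)

theorem pvBFold_some (l : List Bool) (i s : Nat) (out : List (Int × Int)) :
    pvBFin ((PySem.List.enumerate l (i : Int)).foldl pvBStep (some (s : Int), out)) (i + l.length) =
      out ++ pvG l i s := by
  match l with
  | [] => simp [PySem.List.enumerate_nil, pvBFin, pvG]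
  | v :: r =>
    rw [PySem.List.enumerate_cons]
    cases v with
    | true =>
      have ih := pvBFold_none r (i + 1) (out ++ [((s : Int), (i : Int) - 1)])
      push_cast at ih
      simp only [List.foldl_cons, pvBStep, List.length_cons, pvG]
      rw [show i + (r.length + 1) = (i + 1) + r.length from by omega]
      simpa using ih
    | false =>
      have ih := pvBFold_some r (i + 1) s out
      push_cast at ih
      simp only [List.foldl_cons, pvBStep, List.length_cons, pvG]
      rw [show i + (r.length + 1) = (i + 1) + r.length from by omega]
      simpa using ih
termination_by (l.length, 1)
end

theorem pvAlt_f (segs : List Bool) : find_false_segments_py_alt segs = pvF segs 0 := by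
  have := pvBFold_none segs 0 []
  simp only [Nat.zero_add, Nat.cast_zero] at this
  unfold find_false_segments_py_alt pvBFin at *
  simpa using this

-- ===== VERDICT (by name: the statement is the Claim_ definition above) =====
theorem find_false_segments_py_spec : Claim_equal_find_false_segments_py := by
  intro segs _
  unfold Spec_find_false_segments_py find_false_segments_py
  rw [pvALoop_f, pvAlt_f]
  simp
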